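-- pv_equiv track=rewrite | github.com/Ugo5738/swimbuddz-backend | services/reporting_service/services/aggregator.py | _compute_streaks
-- ===== SOURCE A (Python) =====
-- def _compute_streaks(attendance_data: dict) -> tuple[int, int]:
--     """Compute longest and current weekly attendance streaks.
--
--     Expects attendance_data to contain 'weekly_attendance' — a list of booleans
--     indicating whether the member attended at least one session each week.
--     """
--     weeks = attendance_data.get("weekly_attendance", [])
--     if not weeks:
--         return 0, 0
--
--     longest = 0
--     current = 0
--
--     for attended in weeks:
--         if attended:
--             current += 1
--             longest = max(longest, current)
--         else:
--             current = 0
--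
--     return longest, current
-- ===== SOURCE B (Python) =====
-- def _compute_streaks(attendance_data: dict) -> tuple[int, int]:
--     """Compute longest and current weekly attendance streaks via run-length encoding."""
--     weeks = attendance_data.get("weekly_attendance", [])
--     runs = []
--     i = 0
--     n = len(weeks)
--     while i < n:
--         j = i + 1
--         while j < n and bool(weeks[j]) == bool(weeks[i]):
--             j += 1
--         runs.append((bool(weeks[i]), j - i))
--         i = j
--     longest = max((length for flag, length in runs if flag), default=0)
--     current = runs[-1][1] if runs and runs[-1][0] else 0
--     return longest, current
-- ===== Notes on version B (the rewrite author's own statement) =====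
-- stated objective: alternative
-- what changed: B splits the weeks list into runs of consecutive equal truth-values (run-length encoding) and then reduces over the runs (max of True-run lengths; length of the last run if True), instead of A's single accumulator fold over individual weeks.
import Mathlib
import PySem

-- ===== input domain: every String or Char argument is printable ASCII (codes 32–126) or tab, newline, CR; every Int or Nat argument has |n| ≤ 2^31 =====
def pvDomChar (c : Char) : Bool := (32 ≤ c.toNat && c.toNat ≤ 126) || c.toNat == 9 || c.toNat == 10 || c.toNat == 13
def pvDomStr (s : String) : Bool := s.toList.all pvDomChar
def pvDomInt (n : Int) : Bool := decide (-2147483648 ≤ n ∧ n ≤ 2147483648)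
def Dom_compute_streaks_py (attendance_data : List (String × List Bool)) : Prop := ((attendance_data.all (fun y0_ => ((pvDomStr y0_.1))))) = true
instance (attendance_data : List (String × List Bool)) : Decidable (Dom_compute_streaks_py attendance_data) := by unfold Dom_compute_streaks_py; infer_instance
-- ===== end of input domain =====

-- B re-implements the streak computation by run-length encoding the weeks list; A is a single accumulator fold.
-- The ports agree on every input (no Pre_ needed: both Pythons are total).

-- ===== PORT A =====
-- attendance_data.get("weekly_attendance", []): first-match association-list lookup with default []
def lookupWeeks : List (String × List Bool) → List Bool
  | [] => []
  | (k, v) :: rest => if k == "weekly_attendance" then v else lookupWeeks rest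

def compute_streaks_py (attendance_data : List (String × List Bool)) : Int × Int :=
  let weeks := lookupWeeks attendance_data
  if weeks = [] then (0, 0)
  else
    weeks.foldl
      (fun (p : Int × Int) attended =>
        if attended then (max p.1 (p.2 + 1), p.2 + 1) else (p.1, 0))
      (0, 0)

-- ===== PORT B =====
-- the outer while loop of Source B: emit (flag, run length) for each maximal run of equal values
def pyRuns : List Bool → List (Bool × Int)
  | [] => []
  | b :: bs =>
      (b, 1 + ((bs.takeWhile (· == b)).length : Int)) :: pyRuns (bs.dropWhile (· == b))
termination_by l => l.length
decreasing_by
  simp only [List.length_cons]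
  exact Nat.lt_succ_of_le (List.length_dropWhile_le _ _)

def compute_streaks_py_alt (attendance_data : List (String × List Bool)) : Int × Int :=
  let runs := pyRuns (lookupWeeks attendance_data)
  -- max(..., default=0): all run lengths are ≥ 1, so foldl max 0 is exactly Python's max with default 0
  let longest := ((runs.filter (·.1)).map (·.2)).foldl max 0
  let current :=
    match runs.getLast? with
    | some (true, n) => n
    | _ => 0
  (longest, current)

-- ===== PRECONDITION & SPEC =====
def Spec_compute_streaks_py (attendance_data : List (String × List Bool)) (out : Int × Int) : Prop := out = compute_streaks_py_alt attendance_data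
instance (attendance_data : List (String × List Bool)) (out : Int × Int) : Decidable (Spec_compute_streaks_py attendance_data out) := by unfold Spec_compute_streaks_py; infer_instance

-- ===== CLAIM (what is proved, stated in full; the proofs are below) =====
def Claim_equal_compute_streaks_py : Prop := ∀ (attendance_data : List (String × List Bool)), Dom_compute_streaks_py attendance_data → Spec_compute_streaks_py attendance_data (compute_streaks_py attendance_data)

-- ===== LEMMAS AND PROOFS =====

def streakStep (p : Int × Int) (attended : Bool) : Int × Int :=
  if attended then (max p.1 (p.2 + 1), p.2 + 1) else (p.1, 0)

def lensMax (rs : List (Bool × Int)) : Int := ((rs.filter (·.1)).map (·.2)).foldl max 0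

def curOf (rs : List (Bool × Int)) : Int :=
  match rs.getLast? with
  | some (true, n) => n
  | _ => 0

lemma foldl_max_shift (l : List Int) (a b : Int) :
    l.foldl max (max a b) = max a (l.foldl max b) := by
  induction l generalizing b with
  | nil => rfl
  | cons x t ih =>
      simp only [List.foldl_cons]
      rw [max_assoc, ih]

lemma lensMax_nonneg (rs : List (Bool × Int)) : 0 ≤ lensMax rs :=
  (PySem.List.le_foldl_max _ 0).1

lemma lensMax_cons_true (k : Int) (rs : List (Bool × Int)) :
    lensMax ((true, k) :: rs) = max k (lensMax rs) := by
  unfold lensMax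
  simp only [List.filter_cons, if_true, List.map_cons, List.foldl_cons]
  rw [max_comm 0 k, foldl_max_shift]

lemma lensMax_cons_false (k : Int) (rs : List (Bool × Int)) :
    lensMax ((false, k) :: rs) = lensMax rs := by
  unfold lensMax
  simp

lemma curOf_cons (r : Bool × Int) (x : Bool × Int) (rs : List (Bool × Int)) :
    curOf (r :: x :: rs) = curOf (x :: rs) := by
  unfold curOf
  rw [List.getLast?_cons_cons]

lemma pyRuns_ne_nil {ws : List Bool} (h : ws ≠ []) : pyRuns ws ≠ [] := by
  cases ws with
  | nil => exact absurd rfl h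
  | cons b bs => rw [pyRuns]; simp

lemma foldl_trues (t : List Bool) (L C : Int) (ht : ∀ x ∈ t, x = true) (hLC : C ≤ L) :
    t.foldl streakStep (L, C) = (max L (C + t.length), C + t.length) := by
  induction t generalizing L C with
  | nil => simp; omega
  | cons x t ih =>
      have hx : x = true := ht x (by simp)
      subst hx
      simp only [List.foldl_cons]
      rw [show streakStep (L, C) true = (max L (C + 1), C + 1) from by simp [streakStep]]
      rw [ih _ _ (fun y hy => ht y (by simp [hy])) (le_max_right _ _)]
      simp only [List.length_cons, Prod.mk.injEq]
      push_cast
      constructor <;> omega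

lemma foldl_falses (t : List Bool) (L : Int) (ht : ∀ x ∈ t, x = false) :
    t.foldl streakStep (L, 0) = (L, 0) := by
  induction t with
  | nil => rfl
  | cons x t ih =>
      have hx : x = false := ht x (by simp)
      subst hx
      simp only [List.foldl_cons]
      rw [show streakStep (L, 0) false = (L, 0) from by simp [streakStep]]
      exact ih (fun y hy => ht y (by simp [hy]))

lemma main_lemma (ws : List Bool) : ∀ L : Int, 0 ≤ L →
    ws.foldl streakStep (L, 0) = (max L (lensMax (pyRuns ws)), curOf (pyRuns ws)) := by
  induction ws using pyRuns.induct with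
  | case1 => intro L hL; simp [pyRuns, lensMax, curOf]; omega
  | case2 b bs ih =>
      intro L hL
      have hbs := List.takeWhile_append_dropWhile (p := (· == b)) (l := bs)
      rw [pyRuns]
      generalize hts : bs.takeWhile (· == b) = t at hbs ⊢
      generalize hds : bs.dropWhile (· == b) = d at hbs ih ⊢
      have htmem : ∀ x ∈ t, x = b := by
        intro x hx
        rw [← hts] at hx
        simpa using List.mem_takeWhile_imp hx
      have hdhead : ∀ x xs, d = x :: xs → x ≠ b := by
        intro x xs hcons hxb
        have hne : bs.dropWhile (· == b) ≠ [] := by rw [hds, hcons]; simp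
        have h2 := List.head_dropWhile_not (· == b) hne
        have h3 : (bs.dropWhile (· == b)).head hne = x := by
          simp [hds, hcons]
        rw [h3, hxb] at h2
        simp at h2
      cases b with
      | true =>
          have hLhs : (true :: bs).foldl streakStep (L, 0)
              = d.foldl streakStep (max (max L 1) (1 + (t.length : Int)), 1 + (t.length : Int)) := by
            conv_lhs => rw [← hbs]
            show ((true :: t) ++ d).foldl streakStep (L, 0) = _
            rw [List.foldl_append, List.foldl_cons]
            rw [show streakStep (L, 0) true = (max L 1, 1) from by simp [streakStep]]
            rw [foldl_trues t (max L 1) 1 (fun x hx => htmem x hx) (le_max_right _ _)]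
          cases hd : d with
          | nil =>
              rw [hd] at hLhs
              simp only [List.foldl_nil] at hLhs
              rw [hLhs]
              rw [show pyRuns ([] : List Bool) = [] from by rw [pyRuns]]
              simp only [lensMax, curOf, List.filter_cons, List.filter_nil, List.map_cons,
                List.map_nil, List.foldl_cons, List.foldl_nil, List.getLast?_singleton,
                if_true, Prod.mk.injEq]
              exact ⟨by omega, by trivial⟩
          | cons x d' =>
              have hx : x = false := by
                have := hdhead x d' hd
                cases x
                · rfl
                · exact absurd rfl this
              subst hx
              have hdrop : d.foldl streakStep (max (max L 1) (1 + (t.length : Int)), 1 + (t.length : Int))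
                  = d.foldl streakStep (max (max L 1) (1 + (t.length : Int)), 0) := by
                rw [hd]
                simp only [List.foldl_cons]
                rw [show ∀ M : Int × Int, streakStep M false = (M.1, 0) from fun M => by simp [streakStep],
                    show ∀ M : Int × Int, streakStep M false = (M.1, 0) from fun M => by simp [streakStep]]
              rw [hLhs, hdrop, ih _ (by positivity)]
              have hdn : pyRuns d ≠ [] := pyRuns_ne_nil (by rw [hd]; simp)
              obtain ⟨r, rs, hrs⟩ := List.exists_cons_of_ne_nil hdn
              rw [← hd, hrs, lensMax_cons_true, curOf_cons]
              simp only [Prod.mk.injEq]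
              exact ⟨by omega, by trivial⟩
      | false =>
          have hLhs : (false :: bs).foldl streakStep (L, 0) = d.foldl streakStep (L, 0) := by
            conv_lhs => rw [← hbs]
            show ((false :: t) ++ d).foldl streakStep (L, 0) = _
            rw [List.foldl_append, List.foldl_cons]
            rw [show streakStep (L, 0) false = (L, 0) from by simp [streakStep]]
            rw [foldl_falses t L (fun x hx => htmem x hx)]
          rw [hLhs, ih _ hL, lensMax_cons_false]
          cases hd : d with
          | nil =>
              rw [show pyRuns ([] : List Bool) = [] from by rw [pyRuns]]
              simp [lensMax, curOf]
          | cons x d' =>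
              have hdn : pyRuns d ≠ [] := pyRuns_ne_nil (by rw [hd]; simp)
              obtain ⟨r, rs, hrs⟩ := List.exists_cons_of_ne_nil hdn
              rw [← hd, hrs, curOf_cons, ← hrs]

-- ===== VERDICT (by name: the statement is the Claim_ definition above) =====
theorem compute_streaks_py_spec : Claim_equal_compute_streaks_py := by
  intro ad _
  unfold Spec_compute_streaks_py compute_streaks_py compute_streaks_py_alt
  have hstep : (fun (p : Int × Int) attended =>
      if attended then (max p.1 (p.2 + 1), p.2 + 1) else (p.1, 0)) = streakStep := rfl
  simp only [hstep]
  cases hw : lookupWeeks ad with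
  | nil => simp [pyRuns]
  | cons b bs =>
      simp only [reduceCtorEq, if_false]
      rw [main_lemma (b :: bs) 0 le_rfl]
      show (max 0 (lensMax (pyRuns (b :: bs))), curOf (pyRuns (b :: bs)))
          = (lensMax (pyRuns (b :: bs)), curOf (pyRuns (b :: bs)))
      have := lensMax_nonneg (pyRuns (b :: bs))
      simp only [Prod.mk.injEq]
      exact ⟨by omega, by trivial⟩
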